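-- pv_equiv track=rewrite | github.com/Siria-Catherine-Iniguez-Brito/Master-Ingenieria-Matematica-UCM-2025-2026 | Courses/Core-Curriculum/Advanced-Optimization-Techniques/Practica3_TAO/Practica3_TAO.py | Calcular_Dominancia
-- ===== SOURCE A (Python) =====
-- def Calcular_Dominancia(t, PATRONES_LISTA):
--     dominancia_j = []
--
--     # Iterar sobre el patrón j (el que estamos verificando)
--     for j, patron_j in enumerate(PATRONES_LISTA):
--         is_dominated = False
--
--         # Iterar sobre el patrón k (el potencial dominador)
--         for k, patron_k in enumerate(PATRONES_LISTA):
--             if j == k: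
--                 continue
--
--             k_dominates_j_in_pieces = True
--             k_cuts_strictly_more = False
--
--             for i in range(t):
--                 if patron_k[i] < patron_j[i]:
--                     k_dominates_j_in_pieces = False
--                     break
--
--                 if patron_k[i] > patron_j[i]:
--                     k_cuts_strictly_more = True
--
--             if k_dominates_j_in_pieces and k_cuts_strictly_more:
--                 is_dominated = True
--                 break
--
--         dominancia_j.append("DOMINADO" if is_dominated else "NO DOMINADO")
--
--     return dominancia_j
-- ===== SOURCE B (Python) =====
-- def Calcular_Dominancia(t, PATRONES_LISTA):
--     # Project each pattern to its first-t coordinates, deduplicate, decide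
--     # domination once per distinct prefix, then map every pattern to its verdict.
--     prefixes = [tuple(p[i] for i in range(t)) for p in PATRONES_LISTA]
--     distinct = list(dict.fromkeys(prefixes))
--     status = {}
--     for p in distinct:
--         dominated = any(q != p and all(a >= b for a, b in zip(q, p))
--                         for q in distinct)
--         status[p] = "DOMINADO" if dominated else "NO DOMINADO"
--     return [status[p] for p in prefixes]
-- ===== Notes on version B (the rewrite author's own statement) =====
-- stated objective: alternative
-- what changed: Instead of comparing every pattern against every other pattern, B projects each pattern to its first-t prefix, deduplicates the prefixes, decides Pareto domination once per distinct prefix, and maps each pattern to the cached verdict.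
-- outside the precondition, e.g. on Calcular_Dominancia(3, [[1]]): A returns ['NO DOMINADO'], B raises IndexError
import Mathlib
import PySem

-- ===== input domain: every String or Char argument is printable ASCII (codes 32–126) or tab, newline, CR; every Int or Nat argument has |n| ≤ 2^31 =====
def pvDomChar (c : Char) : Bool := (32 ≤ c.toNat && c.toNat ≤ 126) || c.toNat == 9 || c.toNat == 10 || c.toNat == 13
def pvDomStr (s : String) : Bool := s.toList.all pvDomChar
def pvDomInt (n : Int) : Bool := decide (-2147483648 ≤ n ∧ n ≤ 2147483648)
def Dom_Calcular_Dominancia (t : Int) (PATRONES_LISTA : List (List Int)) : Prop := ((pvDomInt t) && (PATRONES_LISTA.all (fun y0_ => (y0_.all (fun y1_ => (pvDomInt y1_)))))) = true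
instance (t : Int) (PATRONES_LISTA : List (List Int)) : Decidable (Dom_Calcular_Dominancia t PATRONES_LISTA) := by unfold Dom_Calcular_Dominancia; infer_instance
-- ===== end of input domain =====

-- B replaces A's all-pairs pattern scan by deduplicating the first-t prefixes and
-- deciding Pareto domination once per distinct prefix (alternative decomposition).


-- ===== PORT A =====
-- Inner 'for i in range(t)' loop with its two flags and the break on patron_k[i] < patron_j[i].
-- patron[i] is ported as pyGetD … 0: exact on Pre_ (every accessed index is in range there).
def pvInnerLoop (pj pk : List Int) (dominates cuts : Bool) : List Int → Bool × Bool
  | [] => (dominates, cuts)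
  | i :: rest =>
      if PySem.List.pyGetD pk i 0 < PySem.List.pyGetD pj i 0 then (false, cuts)
      else pvInnerLoop pj pk dominates
            (cuts || decide (PySem.List.pyGetD pj i 0 < PySem.List.pyGetD pk i 0)) rest

-- Outer 'for k, patron_k in enumerate(…)' loop with 'continue' on j == k and break on success.
def pvKLoop (t : Int) (j : Int) (pj : List Int) : List (Int × List Int) → Bool
  | [] => false
  | (k, pk) :: rest =>
      if j == k then pvKLoop t j pj rest
      else
        let r := pvInnerLoop pj pk true false (PySem.List.pyRange 0 t 1)
        if r.1 && r.2 then true else pvKLoop t j pj rest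

def Calcular_Dominancia (t : Int) (PATRONES_LISTA : List (List Int)) : List String :=
  (PySem.List.enumerate PATRONES_LISTA).foldl
    (fun acc jp =>
      acc ++ [if pvKLoop t jp.1 jp.2 (PySem.List.enumerate PATRONES_LISTA) then "DOMINADO" else "NO DOMINADO"])
    []

-- ===== PORT B =====
-- tuple(p[i] for i in range(t)); p[i] ported as pyGetD … 0, exact on Pre_ (in range there).
def pvPrefix (t : Int) (p : List Int) : List Int :=
  (PySem.List.pyRange 0 t 1).map (fun i => PySem.List.pyGetD p i 0)

def Calcular_Dominancia_alt (t : Int) (PATRONES_LISTA : List (List Int)) : List String :=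
  let prefixes := PATRONES_LISTA.map (pvPrefix t)
  let distinct := PySem.List.dedup prefixes
  let status :=
    distinct.foldl
      (fun d p =>
        d.insert p
          (if distinct.any (fun q =>
                decide (q ≠ p) && (q.zip p).all (fun ab => decide (ab.2 ≤ ab.1)))
           then "DOMINADO" else "NO DOMINADO"))
      PySem.Dict.empty
  -- status[p]: the lookup always succeeds (every prefix is a key), so getD is exact.
  prefixes.map (fun p => status.getD p "NO DOMINADO")

-- ===== PRECONDITION & SPEC =====
-- Pre_ excludes inputs where some pattern is shorter than t (for positive t): there Python
-- indexes out of range — A raises IndexError on almost all of them, and on the few where A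
-- still returns (e.g. a single pattern, so no pair is ever compared and the index is never
-- touched) B raises IndexError, so those inputs cannot be matched.
def Pre_Calcular_Dominancia (t : Int) (PATRONES_LISTA : List (List Int)) : Prop :=
  t ≤ 0 ∨ ∀ p ∈ PATRONES_LISTA, t ≤ (p.length : Int)
instance (t : Int) (PATRONES_LISTA : List (List Int)) : Decidable (Pre_Calcular_Dominancia t PATRONES_LISTA) := by unfold Pre_Calcular_Dominancia; infer_instance

def pvWitness_Calcular_Dominancia : Int × List (List Int) := (2, [[1, 2], [2, 2], [0, 3]])

def Spec_Calcular_Dominancia (t : Int) (PATRONES_LISTA : List (List Int)) (out : List String) : Prop := out = Calcular_Dominancia_alt t PATRONES_LISTA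
instance (t : Int) (PATRONES_LISTA : List (List Int)) (out : List String) : Decidable (Spec_Calcular_Dominancia t PATRONES_LISTA out) := by unfold Spec_Calcular_Dominancia; infer_instance

-- ===== CLAIM (what is proved, stated in full; the proofs are below) =====
def Claim_equal_Calcular_Dominancia : Prop := ∀ (t : Int) (PATRONES_LISTA : List (List Int)), Dom_Calcular_Dominancia t PATRONES_LISTA → Pre_Calcular_Dominancia t PATRONES_LISTA → Spec_Calcular_Dominancia t PATRONES_LISTA (Calcular_Dominancia t PATRONES_LISTA)

-- ===== LEMMAS AND PROOFS =====

def pvBdom (p q : List Int) : Bool :=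
  decide (q ≠ p) && (q.zip p).all (fun ab => decide (ab.2 ≤ ab.1))

def pvAdom (t : Int) (pj pk : List Int) : Bool :=
  (pvInnerLoop pj pk true false (PySem.List.pyRange 0 t 1)).1 &&
  (pvInnerLoop pj pk true false (PySem.List.pyRange 0 t 1)).2

theorem inner_eq (pj pk : List Int) : ∀ (is : List Int) (c : Bool),
    ((pvInnerLoop pj pk true c is).1 && (pvInnerLoop pj pk true c is).2)
    = (is.all (fun i => decide (PySem.List.pyGetD pj i 0 ≤ PySem.List.pyGetD pk i 0)) &&
       (c || is.any (fun i => decide (PySem.List.pyGetD pj i 0 < PySem.List.pyGetD pk i 0)))) := by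
  intro is
  induction is with
  | nil => intro c; simp [pvInnerLoop]
  | cons i rest ih =>
      intro c
      by_cases h : PySem.List.pyGetD pk i 0 < PySem.List.pyGetD pj i 0
      · simp [pvInnerLoop, h, not_le.mpr h]
      · simp only [pvInnerLoop, if_neg h, ih, List.all_cons, List.any_cons]
        have hle : PySem.List.pyGetD pj i 0 ≤ PySem.List.pyGetD pk i 0 := not_lt.mp h
        simp [hle]
        cases c <;> cases (decide (PySem.List.pyGetD pj i 0 < PySem.List.pyGetD pk i 0)) <;> simp

theorem kloop_eq (t : Int) (j : Int) (pj : List Int) : ∀ (pairs : List (Int × List Int)),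
    pvKLoop t j pj pairs = pairs.any (fun kp => (!(j == kp.1)) && pvAdom t pj kp.2) := by
  intro pairs
  induction pairs with
  | nil => simp [pvKLoop]
  | cons kp rest ih =>
      obtain ⟨k, pk⟩ := kp
      cases hjk : (j == k) with
      | true => simp [pvKLoop, hjk, ih]
      | false =>
        simp only [pvKLoop, hjk, ih, List.any_cons, pvAdom]
        cases hr : ((pvInnerLoop pj pk true false (PySem.List.pyRange 0 t 1)).1 &&
            (pvInnerLoop pj pk true false (PySem.List.pyRange 0 t 1)).2) <;> simp

theorem adom_eq_bdom (t : Int) (pj pk : List Int) :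
    pvAdom t pj pk = pvBdom (pvPrefix t pj) (pvPrefix t pk) := by
  unfold pvAdom pvBdom pvPrefix
  rw [inner_eq, List.zip_map', List.all_map]
  set R := PySem.List.pyRange 0 t 1
  simp only [Bool.false_or, Function.comp_def]
  by_cases hall : R.all (fun i => decide (PySem.List.pyGetD pj i 0 ≤ PySem.List.pyGetD pk i 0)) = true
  · have hle : ∀ i ∈ R, PySem.List.pyGetD pj i 0 ≤ PySem.List.pyGetD pk i 0 := by
      simpa [List.all_eq_true] using hall
    have hne : (R.any (fun i => decide (PySem.List.pyGetD pj i 0 < PySem.List.pyGetD pk i 0)))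
        = decide (R.map (fun i => PySem.List.pyGetD pk i 0) ≠ R.map (fun i => PySem.List.pyGetD pj i 0)) := by
      rw [Bool.eq_iff_iff]
      simp only [List.any_eq_true, decide_eq_true_eq, ne_eq, List.map_inj_left, not_forall]
      constructor
      · rintro ⟨i, hi, hlt⟩; exact ⟨i, hi, by omega⟩
      · rintro ⟨i, hi, hne⟩; exact ⟨i, hi, by have := hle i hi; omega⟩
    rw [hne, hall]
    cases hd : decide (R.map (fun i => PySem.List.pyGetD pk i 0) ≠ R.map (fun i => PySem.List.pyGetD pj i 0)) <;>
      simp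
  · rw [Bool.not_eq_true] at hall
    rw [hall]
    simp

theorem dict_fold_getD (f : List Int → String) (p : List Int) (dflt : String) :
    ∀ (ds : List (List Int)) (d : PySem.Dict (List Int) String),
    ((ds.foldl (fun d x => d.insert x (f x)) d).getD p dflt)
    = if p ∈ ds then f p else d.getD p dflt := by
  intro ds
  induction ds with
  | nil => intro d; simp
  | cons x rest ih =>
      intro d
      simp only [List.foldl_cons, ih, List.mem_cons]
      by_cases hp : p ∈ rest <;> by_cases hx : p = x <;>
        simp [hp, hx, PySem.Dict.getD_insert]

theorem any_dedup (xs : List (List Int)) (f : List Int → Bool) :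
    (PySem.List.dedup xs).any f = xs.any f := by
  rw [Bool.eq_iff_iff]
  simp [List.any_eq_true]

theorem crux (t : Int) (L : List (List Int)) (j : Nat) (hj : j < L.length) :
    ((PySem.List.enumerate L).any (fun kp => (!((j : Int) == kp.1)) && pvBdom (pvPrefix t L[j]) (pvPrefix t kp.2)))
    = (L.map (pvPrefix t)).any (fun q => pvBdom (pvPrefix t L[j]) q) := by
  rw [Bool.eq_iff_iff]
  simp only [List.any_eq_true, PySem.List.mem_enumerate_iff, List.mem_map]
  constructor
  · rintro ⟨kp, ⟨k, hk, rfl⟩, hpred⟩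
    simp only [Bool.and_eq_true] at hpred
    exact ⟨pvPrefix t L[k], ⟨L[k], List.getElem_mem hk, rfl⟩, hpred.2⟩
  · rintro ⟨q, ⟨pk, hpk, rfl⟩, hq⟩
    obtain ⟨k, hk, rfl⟩ := List.mem_iff_getElem.mp hpk
    have hne : pvPrefix t L[k] ≠ pvPrefix t L[j] := by
      simp only [pvBdom, Bool.and_eq_true, decide_eq_true_eq] at hq
      exact hq.1
    have hkj : ¬((j : Int) == ((0 : Int) + (k : Nat)) ) = true := by
      simp only [beq_iff_eq, zero_add]
      intro h
      have : j = k := by exact_mod_cast h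
      subst this
      exact hne rfl
    refine ⟨((0 : Int) + (k : Nat), L[k]), ⟨k, hk, rfl⟩, ?_⟩
    simp only [Bool.and_eq_true, Bool.not_eq_eq_eq_not, Bool.not_true]
    exact ⟨by simpa using hkj, hq⟩

theorem main_eq (t : Int) (L : List (List Int)) :
    Calcular_Dominancia t L = Calcular_Dominancia_alt t L := by
  unfold Calcular_Dominancia Calcular_Dominancia_alt
  rw [PySem.List.foldl_append_singleton_eq_map, List.map_map]
  simp only [List.nil_append]
  apply List.ext_getElem
  · simp [PySem.List.length_enumerate]
  · intro j h1 h2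
    have hj : j < L.length := by simpa using h2
    simp only [List.getElem_map, PySem.List.getElem_enumerate, Function.comp_apply]
    rw [kloop_eq]
    have hrw : (fun (kp : Int × List Int) => (!((0 : Int) + (j : Nat) == kp.1)) && pvAdom t L[j] kp.2)
        = (fun kp => (!((j : Int) == kp.1)) && pvBdom (pvPrefix t L[j]) (pvPrefix t kp.2)) := by
      funext kp; rw [adom_eq_bdom]; norm_num
    rw [hrw, crux t L j hj]
    rw [dict_fold_getD (fun p => if (PySem.List.dedup (L.map (pvPrefix t))).any
          (fun q => decide (q ≠ p) && (q.zip p).all (fun ab => decide (ab.2 ≤ ab.1))) then "DOMINADO" else "NO DOMINADO")]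
    have hmem : pvPrefix t L[j] ∈ PySem.List.dedup (L.map (pvPrefix t)) := by
      simp only [PySem.List.mem_dedup, List.mem_map]
      exact ⟨L[j], List.getElem_mem hj, rfl⟩
    rw [if_pos hmem, any_dedup]
    rfl

-- ===== VERDICT (by name: the statement is the Claim_ definition above) =====
theorem Calcular_Dominancia_spec : Claim_equal_Calcular_Dominancia := by
  intro t L _ _
  unfold Spec_Calcular_Dominancia
  exact main_eq t L
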